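-- pv_equiv track=rewrite | github.com/tomasnyberg/tomaslang | integration_tests.py | find_diff
-- ===== SOURCE A (Python) =====
-- def find_diff(expected, result):
--     line = 0
--     for c in range(min(len(expected), len(result))):
--         if expected[c] == "\n":
--             line += 1
--         if expected[c] != result[c]:
--             errstring = ""
--             errstring += f"Diff at line {line} character {c}:\n"
--             errstring += f"Expected: {repr(expected[c])}\n"
--             errstring += f"Got: {repr(result[c])}\n"
--             return errstring
--     return ""
-- ===== SOURCE B (Python) =====
-- def find_diff(expected, result):
--     n = min(len(expected), len(result))
--     i = next((k for k in range(n) if expected[k] != result[k]), None)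
--     if i is None:
--         return ""
--     line = expected[:i + 1].count("\n")
--     return (f"Diff at line {line} character {i}:\n"
--             f"Expected: {repr(expected[i])}\n"
--             f"Got: {repr(result[i])}\n")
-- ===== Notes on version B (the rewrite author's own statement) =====
-- stated objective: alternative
-- what changed: A's single interleaved loop carrying a running newline counter is replaced by a find-first-mismatch-index pass followed by a separate newline count over the inclusive prefix expected[:i+1].
import Mathlib
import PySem

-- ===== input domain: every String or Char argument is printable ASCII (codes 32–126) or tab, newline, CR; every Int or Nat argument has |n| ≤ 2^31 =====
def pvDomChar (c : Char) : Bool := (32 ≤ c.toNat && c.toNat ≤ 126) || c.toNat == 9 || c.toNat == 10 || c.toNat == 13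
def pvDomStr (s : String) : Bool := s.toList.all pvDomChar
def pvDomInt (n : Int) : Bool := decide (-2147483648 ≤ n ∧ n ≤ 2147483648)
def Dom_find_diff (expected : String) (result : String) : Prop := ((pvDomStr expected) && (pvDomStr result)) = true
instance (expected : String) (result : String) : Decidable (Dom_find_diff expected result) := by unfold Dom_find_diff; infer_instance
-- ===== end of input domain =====

-- B replaces A's single interleaved scan (newline counter carried through the loop) by a
-- find-first-mismatch-index pass followed by a separate newline count over the inclusive prefix
-- (objective: alternative decomposition, same asymptotic cost).

-- Python's repr() of a one-character string; exact on the Dom alphabet (printable ASCII, tab, newline, CR).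
def pyReprChar (ch : Char) : String :=
  if ch = '\n' then "'\\n'"
  else if ch = '\t' then "'\\t'"
  else if ch = '\r' then "'\\r'"
  else if ch = '\'' then "\"'\""
  else if ch = '\\' then "'\\\\'"
  else String.ofList ['\'', ch, '\'']

-- the f-string message both Pythons build (identical text in A and B)
def diffMsg (line c : Nat) (a b : Char) : String :=
  "Diff at line " ++ PySem.Int.toStr (line : Int) ++ " character " ++ PySem.Int.toStr (c : Int) ++ ":\n"
    ++ "Expected: " ++ pyReprChar a ++ "\n"
    ++ "Got: " ++ pyReprChar b ++ "\n"

-- ===== PORT A =====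
-- A's loop over c in range(min(len,len)) = simultaneous structural recursion on both char lists,
-- carrying the index c and the running newline count `line`.
def aLoop : List Char → List Char → Nat → Nat → String
  | e :: es, r :: rs, c, line =>
    let line' := if e = '\n' then line + 1 else line
    if e ≠ r then diffMsg line' c e r
    else aLoop es rs (c + 1) line'
  | _, _, _, _ => ""

def find_diff (expected : String) (result : String) : String :=
  aLoop expected.toList result.toList 0 0

-- ===== PORT B =====
def find_diff_alt (expected : String) (result : String) : String :=
  let es := expected.toList
  let rs := result.toList
  match (List.zip es rs).findIdx? (fun p => p.1 != p.2) with
  | none => ""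
  | some i =>
    let line := (es.take (i + 1)).count '\n'
    diffMsg line i (es.getD i ' ') (rs.getD i ' ')

-- ===== PRECONDITION & SPEC =====
def Spec_find_diff (expected : String) (result : String) (out : String) : Prop := out = find_diff_alt expected result
instance (expected : String) (result : String) (out : String) : Decidable (Spec_find_diff expected result out) := by unfold Spec_find_diff; infer_instance

-- ===== CLAIM (what is proved, stated in full; the proofs are below) =====
def Claim_equal_find_diff : Prop := ∀ (expected : String) (result : String), Dom_find_diff expected result → Spec_find_diff expected result (find_diff expected result)

-- ===== LEMMAS AND PROOFS =====

lemma aLoop_eq (es : List Char) : ∀ (rs : List Char) (c line : Nat),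
    aLoop es rs c line =
      match (List.zip es rs).findIdx? (fun p => p.1 != p.2) with
      | none => ""
      | some i => diffMsg (line + (es.take (i + 1)).count '\n') (c + i) (es.getD i ' ') (rs.getD i ' ') := by
  induction es with
  | nil => intro rs c line; simp [aLoop]
  | cons e es ih =>
    intro rs c line
    cases rs with
    | nil => simp [aLoop]
    | cons r rs =>
      by_cases her : e = r
      · subst her
        have hbne : (e != e) = false := by simp
        simp only [aLoop, List.zip_cons_cons, List.findIdx?_cons, hbne, Bool.false_eq_true,
          if_false, if_neg (fun h : e ≠ e => h rfl)]
        rw [ih rs (c + 1) (if e = '\n' then line + 1 else line)]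
        cases h : List.findIdx? (fun p => p.1 != p.2) (List.zip es rs) with
        | none => simp
        | some j =>
          simp only [Option.map_some, List.take_succ_cons, List.count_cons,
            List.getD_cons_succ]
          congr 1
          · split_ifs <;> simp_all <;> omega
          · omega
      · have hbne : (e != r) = true := by simp [her]
        simp only [aLoop, List.zip_cons_cons, List.findIdx?_cons, hbne, ne_eq, her,
          not_false_iff, if_pos, List.take_succ_cons, List.take_zero, List.count_cons,
          List.count_nil, List.getD_cons_zero, Nat.add_zero]
        congr 1
        split_ifs <;> simp_all

theorem find_diff_spec : Claim_equal_find_diff := by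
  intro expected result _
  unfold Spec_find_diff find_diff find_diff_alt
  rw [aLoop_eq]
  cases h : List.findIdx? (fun p => p.1 != p.2) (List.zip expected.toList result.toList) with
  | none => simp only [h]
  | some i => simp only [h, Nat.zero_add]
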